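-- pv_equiv track=rewrite | github.com/omkarkorde27/insight-synergy-council | insight_synergy/utils/debate_logger.py | _extract_position_keywords
-- ===== SOURCE A (Python) =====
-- from typing import Dict, List, Any
--
-- def _extract_position_keywords(argument: str) -> List[str]:
--     """Extract key position indicators from argument."""
--     # Simple keyword extraction (in practice, would use NLP)
--     words = argument.lower().split()
--
--     # Filter for meaningful words (exclude common words)
--     stop_words = {"the", "a", "an", "and", "or", "but", "in", "on", "at", "to", "for", "of", "with", "by"}
--     keywords = [word for word in words if len(word) > 3 and word not in stop_words]
--
--     # Return most frequent meaningful words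
--     word_freq = {}
--     for word in keywords:
--         word_freq[word] = word_freq.get(word, 0) + 1
--
--     return sorted(word_freq.keys(), key=lambda x: word_freq[x], reverse=True)
-- ===== SOURCE B (Python) =====
-- from typing import Dict, List, Any
--
-- def _extract_position_keywords(argument: str) -> List[str]:
--     """Extract key position indicators from argument."""
--     stop_words = {"the", "a", "an", "and", "or", "but", "in", "on", "at", "to", "for", "of", "with", "by"}
--     # One fused pass: filter and count together.
--     word_freq = {}
--     for word in argument.lower().split():
--         if len(word) > 3 and word not in stop_words:
--             word_freq[word] = word_freq.get(word, 0) + 1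
--     if not word_freq:
--         return []
--     # Bucket (counting) sort instead of a comparison sort: group words by
--     # frequency in first-appearance order, then emit buckets from the highest
--     # frequency down.
--     buckets = {}
--     for word, count in word_freq.items():
--         buckets.setdefault(count, []).append(word)
--     result = []
--     for count in range(max(buckets), 0, -1):
--         if count in buckets:
--             result.extend(buckets[count])
--     return result
-- ===== Notes on version B (the rewrite author's own statement) =====
-- stated objective: alternative
-- what changed: B fuses the filter and count phases into one pass and replaces sorted(keys, key=freq, reverse=True) with a counting/bucket sort: words are grouped by frequency in first-appearance order and emitted from the maximum frequency down, reproducing the stable descending order without a comparison sort.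
import Mathlib
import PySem

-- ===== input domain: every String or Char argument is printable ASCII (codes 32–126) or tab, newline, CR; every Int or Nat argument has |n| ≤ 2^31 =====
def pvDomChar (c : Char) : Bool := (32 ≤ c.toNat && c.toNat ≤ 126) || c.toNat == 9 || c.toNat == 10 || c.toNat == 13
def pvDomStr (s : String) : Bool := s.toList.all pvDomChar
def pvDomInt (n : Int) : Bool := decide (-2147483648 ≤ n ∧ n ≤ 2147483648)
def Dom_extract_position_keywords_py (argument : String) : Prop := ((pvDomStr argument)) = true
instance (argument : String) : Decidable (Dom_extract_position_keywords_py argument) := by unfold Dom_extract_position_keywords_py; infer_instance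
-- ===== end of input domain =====

-- B replaces A's comparison sort by frequency with a counting/bucket sort and fuses the
-- filter and count passes; same return value, a different algorithm (objective: alternative).

-- shared literal: the stop-word set (a Python set literal in both programs)
def pvStopWords : PySem.Set String :=
  PySem.Set.ofList ["the", "a", "an", "and", "or", "but", "in", "on", "at", "to", "for", "of", "with", "by"]

-- ===== PORT A =====
def extract_position_keywords_py (argument : String) : List String :=
  let words := PySem.Str.split₀ (PySem.Str.lower argument)
  let keywords := words.filter (fun w => decide (3 < PySem.Str.len w) && !(pvStopWords.contains w))
  let word_freq := keywords.foldl (fun d w => d.insert w (d.getD w 0 + 1))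
    (PySem.Dict.mk ([] : List (String × Int)))
  PySem.List.sorted word_freq.keys (fun x => word_freq.getD x 0) true

-- ===== PORT B =====
def extract_position_keywords_py_alt (argument : String) : List String :=
  let word_freq := (PySem.Str.split₀ (PySem.Str.lower argument)).foldl
    (fun d w => if decide (3 < PySem.Str.len w) && !(pvStopWords.contains w)
                then d.insert w (d.getD w 0 + 1) else d) (PySem.Dict.mk ([] : List (String × Int)))
  if word_freq.items = [] then []
  else
    let buckets := word_freq.items.foldl
      (fun b p => b.insert p.2 (b.getD p.2 [] ++ [p.1])) (PySem.Dict.mk ([] : List (Int × List String)))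
    let m := (PySem.List.max? buckets.keys (fun c => c)).getD 0
    (PySem.List.pyRange m 0 (-1)).foldl
      (fun acc c => if buckets.contains c then acc ++ buckets.getD c [] else acc) []

-- ===== PRECONDITION & SPEC =====
def Spec_extract_position_keywords_py (argument : String) (out : List String) : Prop := out = extract_position_keywords_py_alt argument
instance (argument : String) (out : List String) : Decidable (Spec_extract_position_keywords_py argument out) := by unfold Spec_extract_position_keywords_py; infer_instance

-- ===== CLAIM (what is proved, stated in full; the proofs are below) =====
def Claim_equal_extract_position_keywords_py : Prop := ∀ (argument : String), Dom_extract_position_keywords_py argument → Spec_extract_position_keywords_py argument (extract_position_keywords_py argument)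

-- ===== LEMMAS AND PROOFS =====

-- the bucket emission: words of frequency m, then m-1, …, then 1, each block in xs-order
def pvEmit (xs : List String) (key : String → Int) : Nat → List String
  | 0 => []
  | c + 1 => xs.filter (fun x => decide (key x = ((c : Int) + 1))) ++ pvEmit xs key c

theorem pvEmit_nil (key : String → Int) (c : Nat) : pvEmit [] key c = [] := by
  induction c with
  | zero => rfl
  | succ c ih => simp [pvEmit, ih]

theorem mem_pvEmit {xs : List String} {key : String → Int} {c : Nat} {y : String}
    (hy : y ∈ pvEmit xs key c) : key y ≤ (c : Int) ∧ y ∈ xs := by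
  induction c with
  | zero => simp [pvEmit] at hy
  | succ c ih =>
    simp only [pvEmit, List.mem_append] at hy
    rcases hy with h | h
    · rw [List.mem_filter] at h
      refine ⟨?_, h.1⟩
      have := of_decide_eq_true h.2
      omega
    · obtain ⟨h1, h2⟩ := ih h
      exact ⟨by push_cast; omega, h2⟩

theorem pvEmit_append_gt {xs : List String} {key : String → Int} {x : String} {c : Nat}
    (h : (c : Int) < key x) : pvEmit (xs ++ [x]) key c = pvEmit xs key c := by
  induction c with
  | zero => rfl
  | succ c ih =>
    have hne : ¬ (key x = ((c : Int) + 1)) := by push_cast at h ⊢; omega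
    simp only [pvEmit, List.filter_append, List.filter_cons, List.filter_nil,
      decide_eq_true_eq, hne, if_false]
    rw [ih (by push_cast at h ⊢; omega)]
    simp

theorem pvInsertBy_cons (pred : String → String → Bool) (x y : String) (ys : List String) :
    PySem.List.insertBy pred x (y :: ys)
      = if pred x y then x :: y :: ys else y :: PySem.List.insertBy pred x ys := rfl

theorem pvInsertBy_pass {pred : String → String → Bool} {x : String} {l t : List String}
    (h : ∀ y ∈ l, pred x y = false) :
    PySem.List.insertBy pred x (l ++ t) = l ++ PySem.List.insertBy pred x t := by
  induction l with
  | nil => simp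
  | cons y ys ih =>
    have hy := h y (by simp)
    rw [List.cons_append, pvInsertBy_cons, hy]
    simp only [Bool.false_eq_true, if_false, List.cons_append]
    rw [ih (fun z hz => h z (by simp [hz]))]

theorem pvInsertBy_front {pred : String → String → Bool} {x : String} {l : List String}
    (h : ∀ y ∈ l, pred x y = true) :
    PySem.List.insertBy pred x l = x :: l := by
  cases l with
  | nil => rfl
  | cons y ys => rw [pvInsertBy_cons, if_pos (h y (by simp))]

theorem pvInsert_pvEmit {xs : List String} {key : String → Int} {x : String} {m : Nat}
    (h1 : 1 ≤ key x) (h2 : key x ≤ (m : Int)) :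
    PySem.List.insertBy (fun a b => decide (key b < key a)) x (pvEmit xs key m)
      = pvEmit (xs ++ [x]) key m := by
  induction m with
  | zero => simp at h2; omega
  | succ c ih =>
    by_cases hxc : key x = ((c : Int) + 1)
    · -- x joins the top block; everything below has a strictly smaller key
      have hpass : ∀ y ∈ xs.filter (fun x => decide (key x = ((c : Int) + 1))),
          (fun a b => decide (key b < key a)) x y = false := by
        intro y hy
        rw [List.mem_filter] at hy
        have := of_decide_eq_true hy.2
        simp only [decide_eq_false_iff_not]
        omega
      have hfront : ∀ y ∈ pvEmit xs key c, (fun a b => decide (key b < key a)) x y = true := by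
        intro y hy
        have := (mem_pvEmit hy).1
        simp only [decide_eq_true_eq]
        omega
      simp only [pvEmit]
      rw [pvInsertBy_pass hpass, pvInsertBy_front hfront,
        pvEmit_append_gt (show (c : Int) < key x by omega),
        List.filter_append]
      simp [hxc]
    · -- x belongs to a lower bucket; pass over the whole top block
      have hxle : key x ≤ (c : Int) := by push_cast at h2 ⊢; omega
      have hpass : ∀ y ∈ xs.filter (fun x => decide (key x = ((c : Int) + 1))),
          (fun a b => decide (key b < key a)) x y = false := by
        intro y hy
        rw [List.mem_filter] at hy
        have := of_decide_eq_true hy.2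
        simp only [decide_eq_false_iff_not]
        omega
      simp only [pvEmit]
      rw [pvInsertBy_pass hpass, ih hxle, List.filter_append]
      simp [hxc]

theorem pvSorted_eq_pvEmit {xs : List String} {key : String → Int} {m : Nat}
    (h : ∀ x ∈ xs, 1 ≤ key x ∧ key x ≤ (m : Int)) :
    PySem.List.sorted xs key true = pvEmit xs key m := by
  rw [PySem.List.sorted_rev_eq_foldl_insertBy]
  induction xs using List.reverseRecOn with
  | nil => simp [pvEmit_nil]
  | append_singleton ys x ih =>
    rw [List.foldl_append, List.foldl_cons, List.foldl_nil,
      ih (fun z hz => h z (by simp [hz]))]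
    exact pvInsert_pvEmit (h x (by simp)).1 (h x (by simp)).2

-- ---- dictionary facts ----

theorem pvContains_iff {κ ν : Type} [BEq κ] (d : PySem.Dict κ ν) (k : κ) :
    d.contains k = true ↔ (d.get? k).isSome = true := by
  simp [PySem.Dict.contains, PySem.Dict.get?, List.find?_isSome, List.any_eq_true]

theorem pvGetD_of_not_contains {κ ν : Type} [BEq κ] (d : PySem.Dict κ ν) (k : κ) (dflt : ν)
    (h : ¬ d.contains k = true) : d.getD k dflt = dflt := by
  rw [pvContains_iff] at h
  unfold PySem.Dict.getD
  cases hg : d.get? k with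
  | none => rfl
  | some v => rw [hg] at h; simp at h

theorem pvFind?_of_nodup {ps : List (String × Int)} {p : String × Int}
    (hnd : (ps.map Prod.fst).Nodup) (hp : p ∈ ps) :
    ps.find? (fun q => q.1 == p.1) = some p := by
  induction ps with
  | nil => simp at hp
  | cons q ps ih =>
    rw [List.map_cons, List.nodup_cons] at hnd
    rcases List.mem_cons.mp hp with rfl | hp'
    · simp
    · have hne : ¬ (q.1 == p.1) = true := by
        simp only [beq_iff_eq]
        intro he
        exact hnd.1 (he ▸ List.mem_map_of_mem hp')
      simp only [List.find?_cons, hne]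
      exact ih hnd.2 hp'

theorem pvGet?_of_mem_items {d : PySem.Dict String Int} {p : String × Int}
    (hnd : d.keys.Nodup) (hp : p ∈ d.items) : d.get? p.1 = some p.2 := by
  unfold PySem.Dict.get?
  rw [pvFind?_of_nodup hnd hp]
  rfl

-- invariant of the counting fold: distinct keys, all counts ≥ 1
def pvInv (d : PySem.Dict String Int) : Prop :=
  d.keys.Nodup ∧ ∀ p ∈ d.items, 1 ≤ p.2

theorem pvInv_insert {d : PySem.Dict String Int} (w : String) (hd : pvInv d) :
    pvInv (d.insert w (d.getD w 0 + 1)) := by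
  obtain ⟨hnd, hval⟩ := hd
  have hv1 : 1 ≤ d.getD w 0 + 1 := by
    unfold PySem.Dict.getD
    cases hg : d.get? w with
    | none => simp
    | some v =>
      unfold PySem.Dict.get? at hg
      cases hf : d.items.find? (fun p => p.1 == w) with
      | none => rw [hf] at hg; simp at hg
      | some q =>
        rw [hf] at hg
        simp only [Option.map_some, Option.some.injEq] at hg
        have := hval q (List.mem_of_find?_eq_some hf)
        simp [← hg]; omega
  unfold PySem.Dict.insert
  by_cases hc : d.contains w = true
  · simp only [hc, if_true]
    constructor
    · have hmf : (List.map (fun p => if (p.1 == w) = true then (w, d.getD w 0 + 1) else p)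
          d.items).map (fun x => x.1) = d.items.map (fun x => x.1) := by
        rw [List.map_map]
        apply List.map_congr_left
        intro p _
        by_cases hpw : p.1 = w
        · subst hpw; simp
        · simp [hpw]
      show ((List.map (fun p => if (p.1 == w) = true then (w, d.getD w 0 + 1) else p)
          d.items).map (fun x => x.1)).Nodup
      rw [hmf]
      exact hnd
    · intro p hp
      have hp' : p ∈ List.map (fun p => if (p.1 == w) = true then (w, d.getD w 0 + 1) else p)
          d.items := hp
      rw [List.mem_map] at hp'
      obtain ⟨q, hq, hqe⟩ := hp'
      by_cases hqw : (q.1 == w) = true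
      · rw [if_pos hqw] at hqe; rw [← hqe]; exact hv1
      · rw [if_neg hqw] at hqe; rw [← hqe]; exact hval q hq
  · simp only [hc]
    constructor
    · have hw : w ∉ d.keys := by
        intro hmem
        apply hc
        simp only [PySem.Dict.contains, List.any_eq_true]
        simp only [PySem.Dict.keys, List.mem_map] at hmem
        obtain ⟨p, hp, hpe⟩ := hmem
        exact ⟨p, hp, by simp [hpe]⟩
      show ((d.items ++ [(w, d.getD w 0 + 1)]).map (fun x => x.1)).Nodup
      rw [List.map_append, List.nodup_append]
      refine ⟨hnd, by simp, ?_⟩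
      intro a ha b hb
      simp at hb
      subst hb
      exact fun he => hw (he ▸ ha)
    · intro p hp
      have hp' : p ∈ d.items ++ [(w, d.getD w 0 + 1)] := hp
      rw [List.mem_append] at hp'
      rcases hp' with hp' | hp'
      · exact hval p hp'
      · simp at hp'; rw [hp']; exact hv1

theorem pvInv_foldl (ws : List String) :
    ∀ d, pvInv d → pvInv (ws.foldl (fun d w => d.insert w (d.getD w 0 + 1)) d) := by
  induction ws with
  | nil => intro d hd; exact hd
  | cons w ws ih => intro d hd; exact ih _ (pvInv_insert w hd)

-- ---- the bucket fold ----

theorem pvBuckets_get? (ps : List (String × Int)) (c : Int) :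
    (ps.foldl (fun b p => b.insert p.2 (b.getD p.2 [] ++ [p.1]))
        (PySem.Dict.mk ([] : List (Int × List String)))).get? c
      = if c ∈ ps.map Prod.snd
        then some ((ps.filter (fun p => p.2 == c)).map Prod.fst) else none := by
  induction ps using List.reverseRecOn generalizing c with
  | nil => simp [PySem.Dict.get?]
  | append_singleton qs q ih =>
    rw [List.foldl_append, List.foldl_cons, List.foldl_nil]
    by_cases hc : c = q.2
    · rw [hc, PySem.Dict.get?_insert_self]
      have hgd : (qs.foldl (fun b p => b.insert p.2 (b.getD p.2 [] ++ [p.1]))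
          (PySem.Dict.mk ([] : List (Int × List String)))).getD q.2 []
          = (qs.filter (fun p => p.2 == q.2)).map Prod.fst := by
        have hr : (qs.foldl (fun b p => b.insert p.2 (b.getD p.2 [] ++ [p.1]))
            (PySem.Dict.mk ([] : List (Int × List String)))).getD q.2 []
            = ((qs.foldl (fun b p => b.insert p.2 (b.getD p.2 [] ++ [p.1]))
            (PySem.Dict.mk ([] : List (Int × List String)))).get? q.2).getD [] := rfl
        rw [hr, ih q.2]
        by_cases hm : q.2 ∈ qs.map Prod.snd
        · simp [hm]
        · have hfe : qs.filter (fun p => p.2 == q.2) = [] := by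
            rw [List.filter_eq_nil_iff]
            intro p hp hpc
            exact hm (by rw [List.mem_map]; exact ⟨p, hp, beq_iff_eq.mp hpc⟩)
          simp [hm, hfe]
      rw [hgd]
      simp [List.filter_append]
    · rw [PySem.Dict.get?_insert_of_ne _ _ hc, ih c]
      have hq2 : ¬ (q.2 == c) = true := by
        simp only [beq_iff_eq]
        exact fun h => hc h.symm
      have hf : (qs ++ [q]).filter (fun p => p.2 == c) = qs.filter (fun p => p.2 == c) := by
        rw [List.filter_append]
        simp [hq2]
      have hmm : (c ∈ (qs ++ [q]).map Prod.snd) ↔ c ∈ qs.map Prod.snd := by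
        simp [hc]
      simp only [hmm, hf]

theorem pvBuckets_getD (ps : List (String × Int)) (c : Int) :
    (ps.foldl (fun b p => b.insert p.2 (b.getD p.2 [] ++ [p.1]))
        (PySem.Dict.mk ([] : List (Int × List String)))).getD c []
      = (ps.filter (fun p => p.2 == c)).map Prod.fst := by
  have hr : (ps.foldl (fun b p => b.insert p.2 (b.getD p.2 [] ++ [p.1]))
      (PySem.Dict.mk ([] : List (Int × List String)))).getD c []
      = ((ps.foldl (fun b p => b.insert p.2 (b.getD p.2 [] ++ [p.1]))
      (PySem.Dict.mk ([] : List (Int × List String)))).get? c).getD [] := rfl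
  rw [hr, pvBuckets_get?]
  by_cases hm : c ∈ ps.map Prod.snd
  · simp [hm]
  · have : ps.filter (fun p => p.2 == c) = [] := by
      rw [List.filter_eq_nil_iff]
      intro p hp hpc
      exact hm (by rw [List.mem_map]; exact ⟨p, hp, beq_iff_eq.mp hpc⟩)
    simp [hm, this]

theorem pvMem_buckets_keys (ps : List (String × Int)) (c : Int) :
    c ∈ (ps.foldl (fun b p => b.insert p.2 (b.getD p.2 [] ++ [p.1]))
        (PySem.Dict.mk ([] : List (Int × List String)))).keys ↔ c ∈ ps.map Prod.snd := by
  have h1 : c ∈ (ps.foldl (fun b p => b.insert p.2 (b.getD p.2 [] ++ [p.1]))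
      (PySem.Dict.mk ([] : List (Int × List String)))).keys ↔
      ((ps.foldl (fun b p => b.insert p.2 (b.getD p.2 [] ++ [p.1]))
      (PySem.Dict.mk ([] : List (Int × List String)))).get? c).isSome = true := by
    rw [← pvContains_iff]
    simp [PySem.Dict.contains, PySem.Dict.keys, List.any_eq_true, List.mem_map]
  rw [h1, pvBuckets_get?]
  by_cases hm : c ∈ ps.map Prod.snd <;> simp [hm]

theorem pvMax?_cons_isSome (key : Int → Int) (x : Int) (l : List Int) :
    (PySem.List.max? (x :: l) key).isSome = true := by
  unfold PySem.List.max?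
  rw [List.foldl_cons]
  show (List.foldl _ (some x) l).isSome = true
  induction l generalizing x with
  | nil => rfl
  | cons y ys ih =>
    rw [List.foldl_cons]
    by_cases hk : key x < key y
    · simpa [hk] using ih y
    · simpa [hk] using ih x

theorem pvFoldl_if_contains (b : PySem.Dict Int (List String)) (l : List Int) (acc : List String) :
    l.foldl (fun acc c => if b.contains c then acc ++ b.getD c [] else acc) acc
      = l.foldl (fun acc c => acc ++ b.getD c []) acc := by
  induction l generalizing acc with
  | nil => rfl
  | cons c cs ih =>
    simp only [List.foldl_cons]
    by_cases hc : b.contains c = true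
    · rw [if_pos hc, ih]
    · rw [if_neg hc, pvGetD_of_not_contains b c [] hc, List.append_nil, ih]

theorem pvFlatMap_pyRange (g : Int → List String) (xs : List String) (key : String → Int)
    (hg : ∀ c : Nat, g ((c : Int) + 1) = xs.filter (fun x => decide (key x = ((c : Int) + 1)))) :
    ∀ n : Nat, (PySem.List.pyRange (n : Int) 0 (-1)).flatMap g = pvEmit xs key n := by
  intro n
  induction n with
  | zero => rw [PySem.List.pyRange_neg_one_eq_nil (by omega)]; simp [pvEmit]
  | succ c ih =>
    rw [PySem.List.pyRange_neg_one_cons (by push_cast; omega)]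
    have h1 : ((c : Int) + 1) - 1 = (c : Int) := by omega
    rw [List.flatMap_cons]
    push_cast
    rw [h1, ih, hg c]
    rfl

-- the heart of the equivalence, with the (invariant-satisfying) frequency dict abstracted
theorem pvCore (d : PySem.Dict String Int) (hinv : pvInv d) :
    PySem.List.sorted d.keys (fun x => d.getD x 0) true =
      if d.items = [] then []
      else
        (PySem.List.pyRange
          ((PySem.List.max? (d.items.foldl (fun b p => b.insert p.2 (b.getD p.2 [] ++ [p.1]))
            (PySem.Dict.mk ([] : List (Int × List String)))).keys (fun c => c)).getD 0) 0 (-1)).foldl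
          (fun acc c => if (d.items.foldl (fun b p => b.insert p.2 (b.getD p.2 [] ++ [p.1]))
            (PySem.Dict.mk ([] : List (Int × List String)))).contains c
            then acc ++ (d.items.foldl (fun b p => b.insert p.2 (b.getD p.2 [] ++ [p.1]))
              (PySem.Dict.mk ([] : List (Int × List String)))).getD c [] else acc) [] := by
  by_cases hni : d.items = []
  · rw [if_pos hni, PySem.List.sorted_rev_eq_foldl_insertBy]
    simp [PySem.Dict.keys, hni]
  · rw [if_neg hni]
    obtain ⟨p0, ps0, hps0⟩ := List.exists_cons_of_ne_nil hni
    set bks := (d.items.foldl (fun b p => b.insert p.2 (b.getD p.2 [] ++ [p.1]))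
      (PySem.Dict.mk ([] : List (Int × List String)))).keys with hbks
    have hbkc : p0.2 ∈ bks := by
      rw [hbks, pvMem_buckets_keys]
      rw [hps0]; simp
    have hbne : bks ≠ [] := by rintro h; rw [h] at hbkc; simp at hbkc
    obtain ⟨b0, bs0, hbs0⟩ := List.exists_cons_of_ne_nil hbne
    have hsome := pvMax?_cons_isSome (fun c => c) b0 bs0
    obtain ⟨mv, hmv⟩ := Option.isSome_iff_exists.mp hsome
    show PySem.List.sorted d.keys (fun x => d.getD x 0) true
      = (PySem.List.pyRange ((PySem.List.max? bks (fun c => c)).getD 0) 0 (-1)).foldl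
          (fun acc c => if (d.items.foldl (fun b p => b.insert p.2 (b.getD p.2 [] ++ [p.1]))
            (PySem.Dict.mk ([] : List (Int × List String)))).contains c
            then acc ++ (d.items.foldl (fun b p => b.insert p.2 (b.getD p.2 [] ++ [p.1]))
              (PySem.Dict.mk ([] : List (Int × List String)))).getD c [] else acc) []
    rw [hbs0, hmv]
    have hmax : ∀ y ∈ bks, y ≤ mv := by
      rw [hbs0]; exact PySem.List.max?_isMax hmv
    have hp02 : 1 ≤ p0.2 := hinv.2 p0 (by rw [hps0]; simp)
    have hmv1 : 1 ≤ mv := le_trans hp02 (hmax _ hbkc)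
    have hmvnat : ((mv.toNat : Nat) : Int) = mv := Int.toNat_of_nonneg (by omega)
    have hbound : ∀ w ∈ d.keys, 1 ≤ d.getD w 0 ∧ d.getD w 0 ≤ ((mv.toNat : Nat) : Int) := by
      intro w hw
      simp only [PySem.Dict.keys, List.mem_map] at hw
      obtain ⟨p, hp, rfl⟩ := hw
      have hget : d.getD p.1 0 = p.2 := by
        unfold PySem.Dict.getD
        rw [pvGet?_of_mem_items hinv.1 hp]; rfl
      refine ⟨by rw [hget]; exact hinv.2 p hp, ?_⟩
      rw [hget, hmvnat]
      exact hmax _ ((pvMem_buckets_keys d.items p.2).mpr (List.mem_map_of_mem hp))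
    rw [pvSorted_eq_pvEmit (m := mv.toNat) hbound]
    rw [Option.getD_some, pvFoldl_if_contains, PySem.List.foldl_append_eq_flatMap,
      List.nil_append, ← hmvnat]
    simp only [Int.toNat_natCast]
    refine (pvFlatMap_pyRange _ d.keys (fun x => d.getD x 0) ?_ mv.toNat).symm
    intro c
    rw [pvBuckets_getD]
    rw [show (fun x => decide (d.getD x 0 = ((c : Int) + 1)))
        = ((fun v => decide (v = ((c : Int) + 1))) ∘ (fun x => d.getD x 0)) from rfl]
    simp only [PySem.Dict.keys]
    rw [List.filter_map]
    congr 1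
    apply List.filter_congr
    intro p hp
    have hget : d.getD p.1 0 = p.2 := by
      unfold PySem.Dict.getD
      rw [pvGet?_of_mem_items hinv.1 hp]; rfl
    simp only [Function.comp, hget]
    by_cases h : p.2 = (c : Int) + 1 <;> simp [h]

-- ===== VERDICT (by name: the statement is the Claim_ definition above) =====
set_option maxHeartbeats 1000000 in
theorem extract_position_keywords_py_spec : Claim_equal_extract_position_keywords_py := by
  intro argument _
  unfold Spec_extract_position_keywords_py
  simp only [extract_position_keywords_py, extract_position_keywords_py_alt]
  rw [← List.foldl_filter
    (p := fun (w : String) => decide (3 < PySem.Str.len w) && !(pvStopWords.contains w))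
    (f := fun (d : PySem.Dict String Int) w => d.insert w (d.getD w 0 + 1))]
  exact pvCore _ (pvInv_foldl _ _ ⟨List.nodup_nil, fun p hp => nomatch hp⟩)
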